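-- pv_equiv track=rewrite | github.com/sbomify/github-action | sbomify_action/_enrichment/license_db_generator.py | parse_apkindex
-- ===== SOURCE A (Python) =====
-- from typing import Any, Dict, Iterator, Optional, Tuple
--
-- def parse_apkindex(content: str) -> Iterator[Dict[str, str]]:
--     """Parse APKINDEX file format (single-letter fields, blank line separators)."""
--     current: Dict[str, str] = {}
--
--     for line in content.splitlines():
--         line = line.rstrip()
--
--         if not line:
--             if current:
--                 yield current
--                 current = {}
--             continue
--
--         if ":" in line:
--             key, _, value = line.partition(":")
--             current[key] = value
--
--     if current:
--         yield current
-- ===== SOURCE B (Python) =====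
-- def parse_apkindex(content):
--     """Parse APKINDEX format by flat-text transformation: rstrip every line, re-join
--     with newlines, split the whole text on the blank-line separators (two consecutive
--     newlines), and turn each chunk into a dict with a comprehension."""
--     normalized = "\n".join(line.rstrip() for line in content.splitlines())
--     for chunk in normalized.split("\n\n"):
--         record = {key: value
--                   for key, sep, value in (line.partition(":") for line in chunk.split("\n"))
--                   if sep}
--         if record:
--             yield record
-- ===== Notes on version B (the rewrite author's own statement) =====
-- stated objective: alternative
-- what changed: A's stateful per-line loop with a mutable current-dict flushed at blank lines is replaced by a flat-text pipeline: rstrip every line, re-join the lines with a newline separator, split the whole string on the two-consecutive-newlines substring that a blank line produces, and build each record with a dict comprehension over the chunk's lines.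
import Mathlib
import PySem

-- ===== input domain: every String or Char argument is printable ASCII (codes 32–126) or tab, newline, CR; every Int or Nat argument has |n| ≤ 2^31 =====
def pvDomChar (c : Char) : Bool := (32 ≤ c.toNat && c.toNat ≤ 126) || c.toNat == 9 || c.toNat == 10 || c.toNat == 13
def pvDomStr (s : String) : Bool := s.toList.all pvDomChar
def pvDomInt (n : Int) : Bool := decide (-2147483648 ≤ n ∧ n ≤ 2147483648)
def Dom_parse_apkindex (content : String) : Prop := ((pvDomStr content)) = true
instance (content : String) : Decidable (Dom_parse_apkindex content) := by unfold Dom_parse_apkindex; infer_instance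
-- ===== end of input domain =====

-- B replaces A's stateful per-line loop (mutable dict flushed at blank lines) by a flat-text
-- pipeline: rstrip lines, re-join with a newline separator, split the whole string on the
-- two-consecutive-newlines substring a blank line produces, and build each record with a dict
-- comprehension; objective: alternative decomposition, same cost.

-- ===== PORT A =====
-- hand port of line.partition(":") (exact for this single-char separator)
def pvPartition (line : String) : String × String × String :=
  let post := line.toList.dropWhile (· ≠ ':')
  if post = [] then (line, "", "")
  else (String.ofList (line.toList.takeWhile (· ≠ ':')), ":", String.ofList (post.drop 1))

def pvStepA (st : List (List (String × String)) × PySem.Dict String String) (line0 : String) :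
    List (List (String × String)) × PySem.Dict String String :=
  let line := PySem.Str.rstrip line0
  if line = "" then
    if st.2.items = [] then st else (st.1 ++ [st.2.items], PySem.Dict.empty)
  else if PySem.Str.isIn ":" line then
    let kv := pvPartition line
    (st.1, st.2.insert kv.1 kv.2.2)
  else st

def parse_apkindex (content : String) : List (List (String × String)) :=
  let st := (PySem.Str.splitlines content).foldl pvStepA ([], PySem.Dict.empty)
  if st.2.items = [] then st.1 else st.1 ++ [st.2.items]

-- ===== PORT B =====
-- {key: value for key, sep, value in (line.partition(":") for line in lines) if sep}
def pvCompStep (d : PySem.Dict String String) (line : String) : PySem.Dict String String :=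
  let t := pvPartition line
  if t.2.1 ≠ "" then d.insert t.1 t.2.2 else d

def parse_apkindex_alt (content : String) : List (List (String × String)) :=
  let normalized := PySem.Str.join "\n" ((PySem.Str.splitlines content).map PySem.Str.rstrip)
  -- normalized.split("\n\n"); .split has a non-empty separator, so it is Chars.splitOn
  ((PySem.Chars.splitOn normalized.toList ['\n', '\n']).map String.ofList).filterMap
    (fun chunk =>
      let record := ((PySem.Chars.splitOn chunk.toList ['\n']).map String.ofList).foldl
        pvCompStep PySem.Dict.empty
      if record.items = [] then none else some record.items)

-- ===== PRECONDITION & SPEC =====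
def Spec_parse_apkindex (content : String) (out : List (List (String × String))) : Prop := out = parse_apkindex_alt content
instance (content : String) (out : List (List (String × String))) : Decidable (Spec_parse_apkindex content out) := by unfold Spec_parse_apkindex; infer_instance

-- ===== CLAIM (what is proved, stated in full; the proofs are below) =====
def Claim_equal_parse_apkindex : Prop := ∀ (content : String), Dom_parse_apkindex content → Spec_parse_apkindex content (parse_apkindex content)

-- ===== LEMMAS AND PROOFS =====

theorem pvModifyHead_id {α : Type} (l : List α) : l.modifyHead (fun x => x) = l := by
  cases l <;> simp

-- recursive model of str.split(sep) for non-empty sep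
def pvSplit (sep s : List Char) : List (List Char) :=
  if h : sep ≠ [] ∧ sep <+: s then
    [] :: pvSplit sep (s.drop sep.length)
  else match s with
    | [] => [[]]
    | c :: rest => (pvSplit sep rest).modifyHead (c :: ·)
termination_by s.length
decreasing_by
  · have hp := List.IsPrefix.length_le h.2
    have h0 : sep.length ≠ 0 := by simpa using h.1
    simp only [List.length_drop]; omega
  · simp

theorem pvSplit_nil (sep : List Char) : pvSplit sep [] = [[]] := by
  rw [pvSplit]
  have : ¬ (sep ≠ [] ∧ sep <+: []) := by
    rintro ⟨h1, h2⟩; exact h1 (List.prefix_nil.mp h2)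
  simp [this]

theorem pvSplit_pos (sep s : List Char) (hsep : sep ≠ []) (hp : sep <+: s) :
    pvSplit sep s = [] :: pvSplit sep (s.drop sep.length) := by
  rw [pvSplit]; simp [hsep, hp]

theorem pvSplit_neg (sep : List Char) (c : Char) (rest : List Char) (hp : ¬ sep <+: (c :: rest)) :
    pvSplit sep (c :: rest) = (pvSplit sep rest).modifyHead (c :: ·) := by
  rw [pvSplit]
  have : ¬ (sep ≠ [] ∧ sep <+: (c :: rest)) := by rintro ⟨_, h2⟩; exact hp h2
  simp [this]

theorem pvSplit_go (sep : List Char) (hsep : sep ≠ []) :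
    ∀ (fuel : Nat) (s cur : List Char) (acc : List (List Char)), s.length < fuel →
      PySem.Chars.splitOn.go sep fuel s cur acc
        = acc.reverse ++ (pvSplit sep s).modifyHead (cur.reverse ++ ·) := by
  intro fuel
  induction fuel with
  | zero => intro s cur acc h; omega
  | succ n ih =>
    intro s cur acc h
    match s with
    | [] =>
      rw [PySem.Chars.splitOn.go, pvSplit_nil]
      simp
      omega
    | c :: rest =>
      rw [PySem.Chars.splitOn.go]
      by_cases hp : sep <+: (c :: rest)
      · have hb : sep.isPrefixOf (c :: rest) = true := List.isPrefixOf_iff_prefix.mpr hp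
        simp only [hb, if_true]
        have hlen : (List.drop sep.length (c :: rest)).length < n := by
          have h2 := List.IsPrefix.length_le hp
          have h0 : sep.length ≠ 0 := by simpa using hsep
          simp only [List.length_drop] at *
          simp at h h2 ⊢
          omega
        rw [ih _ _ _ hlen, pvSplit_pos sep _ hsep hp]
        simp [pvModifyHead_id]
      · have hb : sep.isPrefixOf (c :: rest) = false := by
          cases hx : sep.isPrefixOf (c :: rest) with
          | false => rfl
          | true => exact absurd (List.isPrefixOf_iff_prefix.mp hx) hp
        simp only [hb, Bool.false_eq_true, if_false]
        rw [ih _ _ _ (by simp at h ⊢; omega), pvSplit_neg sep c rest hp]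
        rw [List.modifyHead_modifyHead]
        have hc : ((fun x => cur.reverse ++ x) ∘ fun x => c :: x) = (fun x : List Char => (c :: cur).reverse ++ x) := by
          funext x; simp
        rw [hc]

theorem splitOn_eq_pvSplit (s sep : List Char) (hsep : sep ≠ []) :
    PySem.Chars.splitOn s sep = pvSplit sep s := by
  show PySem.Chars.splitOn.go sep (s.length + 1) s [] [] = _
  rw [pvSplit_go sep hsep (s.length + 1) s [] [] (by omega)]
  simp only [List.reverse_nil, List.nil_append, pvModifyHead_id]

def pvJoin (L : List String) : List Char := PySem.Chars.join ['\n'] (L.map String.toList)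

def pvNLFree (L : List String) : Prop := ∀ l ∈ L, '\n' ∉ l.toList

theorem pvJoin_cons (x : String) (t : List String) :
    pvJoin (x :: t) = x.toList ++ (if t = [] then [] else '\n' :: pvJoin t) := by
  cases t with
  | nil => simp [pvJoin, PySem.Chars.join_singleton]
  | cons y t' =>
    simp only [pvJoin, List.map_cons, PySem.Chars.join_cons_cons, List.cons_ne_self]
    simp

theorem pvToList_eq_nil (x : String) : x.toList = [] ↔ x = "" := by
  constructor
  · intro h
    have := congrArg String.ofList h
    rwa [String.ofList_toList] at this
  · intro h; simp [h]

-- head of a joined nonempty-line list is never '\n'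
theorem pvJoin_head_ne_nl (y : String) (t : List String) (hy : y ≠ "")
    (hnl : pvNLFree (y :: t)) : ∀ r, pvJoin (y :: t) ≠ '\n' :: r := by
  intro r hcontra
  have hyl : y.toList ≠ [] := fun h => hy ((pvToList_eq_nil y).mp h)
  rw [pvJoin_cons] at hcontra
  match hm : y.toList with
  | [] => exact hyl hm
  | c :: cs =>
    rw [hm] at hcontra
    have hc : c = '\n' := by simpa using congrArg (List.head? ·) hcontra
    have : '\n' ∈ y.toList := by rw [hm, hc]; simp
    exact hnl y (by simp) this

def pvSplitInt : List String → Option (List String × List String)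
  | [] => none
  | [_] => none
  | x :: y :: t =>
    if y = "" ∧ t ≠ [] then some ([x], t)
    else (pvSplitInt (y :: t)).map (fun ps => (x :: ps.1, ps.2))

theorem pvSplitInt_cons_none {x : String} {t : List String}
    (h : pvSplitInt (x :: t) = none) : pvSplitInt t = none := by
  cases t with
  | nil => rfl
  | cons y t' =>
    rw [pvSplitInt] at h
    by_cases hc : y = "" ∧ t' ≠ []
    · simp [hc] at h
    · simp only [hc, if_false] at h
      exact Option.map_eq_none_iff.mp h

theorem pvSplitInt_spec : ∀ {L p s : List String}, pvSplitInt L = some (p, s) →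
    L = p ++ "" :: s ∧ p ≠ [] ∧ s ≠ [] ∧ pvSplitInt p = none ∧
      (p.length = 1 ∨ p.getLast? ≠ some "") := by
  intro L
  induction L with
  | nil => intro p s h; simp [pvSplitInt] at h
  | cons x t ih =>
    intro p s h
    cases t with
    | nil => simp [pvSplitInt] at h
    | cons y t' =>
      rw [pvSplitInt] at h
      by_cases hc : y = "" ∧ t' ≠ []
      · rw [if_pos hc] at h
        have h' := Option.some_inj.mp h
        cases h'
        refine ⟨by simp [hc.1], by simp, hc.2, rfl, Or.inl rfl⟩
      · simp only [hc, if_false, Option.map_eq_some_iff] at h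
        obtain ⟨⟨p', s'⟩, hps, heq⟩ := h
        obtain ⟨hL, hp'ne, hs'ne, hpnone, hlast⟩ := ih hps
        have hp : p = x :: p' := by cases heq; rfl
        have hs : s = s' := by cases heq; rfl
        subst hp; subst hs
        have hyne : y ≠ "" := by
          intro hy
          subst hy
          have ht' : t' = [] := by
            by_contra hne; exact hc ⟨rfl, hne⟩
          subst ht'
          simp [pvSplitInt] at hps
        refine ⟨by simp [hL], by simp, hs'ne, ?_, ?_⟩
        · -- pvSplitInt (x :: p') = none
          have hp'head : ∃ p'', p' = y :: p'' := by
            cases p' with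
            | nil => exact absurd rfl hp'ne
            | cons a b =>
              have : y = a := by simpa using congrArg List.head? hL
              exact ⟨b, by rw [this]⟩
          obtain ⟨p'', hp''⟩ := hp'head
          subst hp''
          rw [pvSplitInt]
          have : ¬ (y = "" ∧ p'' ≠ []) := fun hh => hyne hh.1
          simp only [this, if_false]
          rw [hpnone]; rfl
        · -- length or last
          right
          cases p' with
          | nil => exact absurd rfl hp'ne
          | cons a b =>
            rw [List.getLast?_cons_cons]
            rcases hlast with h1 | h2
            · have hb : b = [] := by simpa using h1
              subst hb
              have : y = a := by simpa using congrArg List.head? hL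
              simp [← this, hyne]
            · exact h2

theorem pvSplitInt_some_lt : ∀ {L p s : List String}, pvSplitInt L = some (p, s) →
    s.length < L.length := by
  intro L p s h
  obtain ⟨hL, -, -, -, -⟩ := pvSplitInt_spec h
  rw [hL]; simp; omega

def pvG (L : List String) : List (List String) :=
  match h : pvSplitInt L with
  | some ps => ps.1 :: pvG ps.2
  | none => [L]
termination_by L.length
decreasing_by
  exact pvSplitInt_some_lt (by rw [h])

-- prepend a '\n'-free chunk: no match can start inside it
theorem pvSplit_prepend (sep' : List Char) : ∀ (x j : List Char), '\n' ∉ x →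
    pvSplit ('\n' :: sep') (x ++ j) = (pvSplit ('\n' :: sep') j).modifyHead (x ++ ·) := by
  intro x
  induction x with
  | nil => intro j _; simp [pvModifyHead_id]
  | cons c x' ih =>
    intro j hx
    have hc : c ≠ '\n' := by intro h; exact hx (by simp [h])
    have hp : ¬ ('\n' :: sep') <+: (c :: (x' ++ j)) := by
      intro h
      obtain ⟨t, ht⟩ := h
      have hh : '\n' = c := by simpa using congrArg List.head? ht
      exact hc hh.symm
    rw [List.cons_append, pvSplit_neg _ _ _ hp, ih j (fun hm => hx (by simp [hm]))]
    rw [List.modifyHead_modifyHead]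
    rfl

theorem pvK1 : ∀ (L : List String), L ≠ [] → pvNLFree L → pvSplitInt L = none →
    pvSplit ['\n', '\n'] (pvJoin L) = [pvJoin L] := by
  intro L
  induction L with
  | nil => intro h; exact absurd rfl h
  | cons x t ih =>
    intro _ hnl hnone
    cases t with
    | nil =>
      rw [pvJoin_cons]
      simp only [if_true, reduceIte, List.append_nil]
      have h2 := pvSplit_prepend ['\n'] x.toList [] (hnl x (by simp))
      simp only [List.append_nil, pvSplit_nil] at h2
      rw [h2]
      simp
    | cons y t' =>
      have hy : ¬ (y = "" ∧ t' ≠ []) := by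
        intro hc
        rw [pvSplitInt, if_pos hc] at hnone
        simp at hnone
      rw [pvJoin_cons, if_neg (by simp)]
      rw [pvSplit_prepend ['\n'] x.toList _ (hnl x (by simp))]
      have hnp : ¬ ['\n', '\n'] <+: ('\n' :: pvJoin (y :: t')) := by
        intro hpre
        obtain ⟨u, hu⟩ := hpre
        simp only [List.cons_append] at hu
        have : pvJoin (y :: t') = '\n' :: (u) := by
          have := List.cons.inj hu
          exact this.2.symm ▸ rfl
        by_cases hyy : y = ""
        · have ht' : t' = [] := by
            by_contra hne; exact hy ⟨hyy, hne⟩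
          subst ht'; subst hyy
          simp [pvJoin_cons] at this
        · exact pvJoin_head_ne_nl y t' hyy (fun l hl => hnl l (by simp [hl])) u this
      rw [pvSplit_neg _ _ _ hnp]
      rw [ih (by simp) (fun l hl => hnl l (by simp at hl ⊢; tauto)) (pvSplitInt_cons_none hnone)]
      simp

theorem pvK2 : ∀ (L : List String), L ≠ [] → pvNLFree L → pvSplitInt L = none →
    (L.length = 1 ∨ L.getLast? ≠ some "") → ∀ r : List Char,
    pvSplit ['\n', '\n'] (pvJoin L ++ '\n' :: '\n' :: r) = pvJoin L :: pvSplit ['\n', '\n'] r := by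
  intro L
  induction L with
  | nil => intro h; exact absurd rfl h
  | cons x t ih =>
    intro _ hnl hnone hlast r
    cases t with
    | nil =>
      rw [pvJoin_cons]
      simp only [if_true, reduceIte, List.append_nil]
      rw [pvSplit_prepend ['\n'] x.toList _ (hnl x (by simp))]
      rw [pvSplit_pos _ _ (by simp) (by simp)]
      simp
    | cons y t' =>
      have hy : ¬ (y = "" ∧ t' ≠ []) := by
        intro hc
        rw [pvSplitInt, if_pos hc] at hnone
        simp at hnone
      have hyne : y ≠ "" := by
        intro hyy
        subst hyy
        cases t' with
        | nil =>
          rcases hlast with h1 | h2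
          · simp at h1
          · simp at h2
        | cons a b => exact hy ⟨rfl, by simp⟩
      rw [pvJoin_cons, if_neg (by simp)]
      rw [List.append_assoc, List.cons_append]
      rw [pvSplit_prepend ['\n'] x.toList _ (hnl x (by simp))]
      have hnp : ¬ ['\n', '\n'] <+: ('\n' :: (pvJoin (y :: t') ++ '\n' :: '\n' :: r)) := by
        intro hpre
        obtain ⟨u, hu⟩ := hpre
        simp only [List.cons_append] at hu
        have heq : pvJoin (y :: t') ++ '\n' :: '\n' :: r = '\n' :: ([] ++ u) := (List.cons.inj hu |>.2).symm
        obtain ⟨c, cs, hm⟩ : ∃ c cs, y.toList = c :: cs := by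
          cases hml : y.toList with
          | nil => exact absurd ((pvToList_eq_nil y).mp hml) hyne
          | cons c cs => exact ⟨c, cs, rfl⟩
        rw [pvJoin_cons] at heq
        rw [hm] at heq
        have hc : c = '\n' := by simpa using congrArg List.head? heq
        exact hnl y (by simp) (by rw [hm, hc]; simp)
      rw [pvSplit_neg _ _ _ hnp]
      have hlast' : (y :: t').length = 1 ∨ (y :: t').getLast? ≠ some "" := by
        cases t' with
        | nil => exact Or.inl rfl
        | cons a b =>
          rcases hlast with h1 | h2
          · simp at h1
          · right; rwa [List.getLast?_cons_cons] at h2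
      rw [ih (by simp) (fun l hl => hnl l (by simp at hl ⊢; tauto)) (pvSplitInt_cons_none hnone) hlast' r]
      simp

theorem pvJoin_append : ∀ (p s : List String), p ≠ [] → s ≠ [] →
    pvJoin (p ++ "" :: s) = pvJoin p ++ '\n' :: '\n' :: pvJoin s := by
  intro p
  induction p with
  | nil => intro s h; exact absurd rfl h
  | cons x p' ih =>
    intro s _ hs
    cases p' with
    | nil =>
      rw [List.cons_append, List.nil_append, pvJoin_cons, pvJoin_cons (x := "") (t := s),
        if_neg hs]
      simp [pvJoin_cons]
    | cons a b =>
      rw [List.cons_append, pvJoin_cons, pvJoin_cons (x := x) (t := a :: b)]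
      rw [if_neg (by simp), if_neg (by simp)]
      rw [ih s (by simp) hs]
      simp

-- the main characterization: splitting the joined text at "\n\n" is pvG
theorem pvMainSplit : ∀ (n : Nat) (L : List String), L.length ≤ n → L ≠ [] → pvNLFree L →
    pvSplit ['\n', '\n'] (pvJoin L) = (pvG L).map pvJoin := by
  intro n
  induction n with
  | zero => intro L h hne; exact absurd (List.length_eq_zero_iff.mp (Nat.le_zero.mp h)) hne
  | succ n ih =>
    intro L hlen hne hnl
    cases hsi : pvSplitInt L with
    | none =>
      rw [pvG]
      rw [hsi]
      rw [pvK1 L hne hnl hsi]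
      rfl
    | some ps =>
      obtain ⟨p, s⟩ := ps
      obtain ⟨hL, hpne, hsne, hpnone, hplast⟩ := pvSplitInt_spec hsi
      rw [pvG, hsi]
      have hplen : p.length = 1 ∨ p.getLast? ≠ some "" := hplast
      rw [hL, pvJoin_append p s hpne hsne]
      rw [pvK2 p hpne (fun l hl => hnl l (by rw [hL]; simp [hl])) hpnone hplast (pvJoin s)]
      have hslen : s.length ≤ n := by
        have := pvSplitInt_some_lt hsi
        omega
      rw [ih s hslen hsne (fun l hl => hnl l (by rw [hL]; simp [hl]))]
      simp

-- round trip: splitting the joined block at "\n" recovers its lines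
theorem pvRoundTrip : ∀ (M : List String), M ≠ [] → pvNLFree M →
    pvSplit ['\n'] (pvJoin M) = M.map String.toList := by
  intro M
  induction M with
  | nil => intro h; exact absurd rfl h
  | cons x t ih =>
    intro _ hnl
    cases t with
    | nil =>
      rw [pvJoin_cons]
      simp only [if_true, reduceIte, List.append_nil]
      have h2 := pvSplit_prepend [] x.toList [] (hnl x (by simp))
      simp only [List.append_nil, pvSplit_nil] at h2
      rw [h2]
      simp
    | cons y t' =>
      rw [pvJoin_cons, if_neg (by simp)]
      rw [pvSplit_prepend [] x.toList _ (hnl x (by simp))]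
      rw [pvSplit_pos _ _ (by simp) (by simp)]
      simp only [List.length_cons, List.length_nil, List.drop_succ_cons, List.drop_zero]
      rw [ih (by simp) (fun l hl => hnl l (by simp at hl ⊢; tauto))]
      simp

-- every line produced by splitlines is free of line-break characters the scanner breaks on
theorem pvSplitlinesGo_free (isB : Char → Bool) (hB : isB '\n' = true) :
    ∀ (n : Nat) (s cur : List Char) (acc : List (List Char)), s.length ≤ n →
      (∀ l ∈ acc, '\n' ∉ l) → '\n' ∉ cur →
      ∀ l ∈ PySem.Chars.splitlines.go isB s cur acc, '\n' ∉ l := by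
  intro n
  induction n with
  | zero =>
    intro s cur acc hlen hacc hcur
    rw [List.length_eq_zero_iff.mp (Nat.le_zero.mp hlen)]
    rw [PySem.Chars.splitlines.go]
    intro l hl
    by_cases hc : cur.isEmpty
    · simp [hc] at hl ⊢
      exact hacc l hl
    · simp [hc] at hl ⊢
      rcases hl with h1 | h2
      · exact hacc l h1
      · subst h2; simpa using hcur
  | succ n ih =>
    intro s cur acc hlen hacc hcur
    rw [PySem.Chars.splitlines.go.eq_def]
    split
    · intro l hl
      by_cases hc : cur.isEmpty
      · simp [hc] at hl ⊢
        exact hacc l hl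
      · simp [hc] at hl ⊢
        rcases hl with h1 | h2
        · exact hacc l h1
        · subst h2; simpa using hcur
    · rename_i rest
      exact ih rest [] _ (by simp at hlen ⊢; omega)
        (by intro l hl
            simp at hl
            rcases hl with h1 | h2
            · subst h1; simpa using hcur
            · exact hacc l h2)
        (by simp)
    · rename_i c rest hnp
      by_cases hc : isB c = true
      · simp only [hc, if_true]
        exact ih rest [] _ (by simp at hlen ⊢; omega)
          (by intro l hl
              simp at hl
              rcases hl with h1 | h2
              · subst h1; simpa using hcur
              · exact hacc l h2)
          (by simp)
      · simp only [hc, if_false]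
        refine ih rest (c :: cur) acc (by simp at hlen ⊢; omega) hacc ?_
        intro hm
        simp at hm
        rcases hm with h1 | h2
        · subst h1; rw [hB] at hc; exact hc rfl
        · exact hcur h2

theorem pvSplitlines_free (cs : List Char) :
    ∀ l ∈ PySem.Chars.splitlines cs, '\n' ∉ l := by
  rw [PySem.Chars.splitlines]
  exact pvSplitlinesGo_free _ (by decide) cs.length cs [] [] le_rfl (by simp) (by simp)

theorem pvRls_free (content : String) :
    pvNLFree ((PySem.Str.splitlines content).map PySem.Str.rstrip) := by
  intro l hl
  simp only [List.mem_map] at hl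
  obtain ⟨l0, hl0, hr⟩ := hl
  have h0 : '\n' ∉ l0.toList := by
    have hm : l0.toList ∈ PySem.Chars.splitlines content.toList := by
      rw [← PySem.Str.splitlines_map_toList]
      exact List.mem_map_of_mem hl0
    exact pvSplitlines_free _ _ hm
  subst hr
  rw [PySem.Str.toList_rstrip]
  intro hmem
  unfold PySem.Chars.rstrip at hmem
  rw [List.mem_reverse] at hmem
  exact h0 (by simpa using (List.dropWhile_sublist _).subset hmem)

-- A's step on an already-rstripped line
def pvStep' (st : List (List (String × String)) × PySem.Dict String String) (line : String) :
    List (List (String × String)) × PySem.Dict String String :=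
  if line = "" then
    if st.2.items = [] then st else (st.1 ++ [st.2.items], PySem.Dict.empty)
  else if PySem.Str.isIn ":" line then
    let kv := pvPartition line
    (st.1, st.2.insert kv.1 kv.2.2)
  else st

-- A's final "if current: yield current"
def pvFlush (st : List (List (String × String)) × PySem.Dict String String) : List (List (String × String)) :=
  if st.2.items = [] then st.1 else st.1 ++ [st.2.items]

def pvInsStep (d : PySem.Dict String String) (line : String) : PySem.Dict String String :=
  if PySem.Str.isIn ":" line then
    let kv := pvPartition line
    d.insert kv.1 kv.2.2
  else d

def pvRecord (block : List String) : PySem.Dict String String :=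
  block.foldl pvInsStep PySem.Dict.empty

def pvBlocks : List String → List (List String)
  | [] => []
  | l :: rest =>
    if l = "" then pvBlocks rest
    else (l :: rest.takeWhile (· ≠ "")) :: pvBlocks (rest.dropWhile (· ≠ ""))
  termination_by ls => ls.length
  decreasing_by
  · simp
  · exact Nat.lt_succ_of_le (List.length_dropWhile_le _ _)

theorem pvStep'_nonblank (acc : List (List (String × String))) (d : PySem.Dict String String)
    (l : String) (hl : l ≠ "") : pvStep' (acc, d) l = (acc, pvInsStep d l) := by
  simp [pvStep', pvInsStep, hl]
  split <;> rfl

theorem pvRunFold (run : List String) :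
    ∀ (acc : List (List (String × String))) (d : PySem.Dict String String),
      (∀ l ∈ run, l ≠ "") →
      run.foldl pvStep' (acc, d) = (acc, run.foldl pvInsStep d) := by
  induction run with
  | nil => intro acc d _; rfl
  | cons l t ih =>
    intro acc d h
    simp only [List.foldl_cons, pvStep'_nonblank acc d l (h l (by simp))]
    exact ih acc _ (fun x hx => h x (by simp [hx]))

theorem pvDropWhile_head {p : String → Bool} {l : List String} {x : String} {xs : List String}
    (h : l.dropWhile p = x :: xs) : p x = false := by
  induction l with
  | nil => simp at h
  | cons a t ih =>
    rw [List.dropWhile_cons] at h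
    by_cases hpa : p a = true
    · rw [if_pos hpa] at h; exact ih h
    · rw [if_neg hpa] at h; cases h; simpa using hpa

-- the contribution of one finished dict to the output
def pvOut' (d : PySem.Dict String String) : List (List (String × String)) :=
  if d.items = [] then [] else [d.items]

def pvOut (b : List String) : List (List (String × String)) := pvOut' (pvRecord b)

def pvOutF : List String → Option (List (String × String)) :=
  fun b => if (pvRecord b).items = [] then none else some (pvRecord b).items

theorem pvFlush_eq (acc : List (List (String × String))) (d : PySem.Dict String String) :
    pvFlush (acc, d) = acc ++ pvOut' d := by
  unfold pvFlush pvOut'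
  by_cases h : d.items = [] <;> simp [h]

theorem pvStepBlank (acc : List (List (String × String))) (d : PySem.Dict String String) :
    pvStep' (acc, d) "" = (acc ++ pvOut' d, PySem.Dict.empty) := by
  unfold pvStep' pvOut'
  by_cases h : d.items = []
  · have hd : d = PySem.Dict.empty := PySem.Dict.ext (by simp [h, PySem.Dict.empty])
    have he : PySem.Dict.empty.items = ([] : List (String × String)) := rfl
    subst hd
    simp [he]
  · simp [h]

theorem pvFilterMap_cons (b : List String) (bs : List (List String)) :
    (b :: bs).filterMap pvOutF = pvOut b ++ bs.filterMap pvOutF := by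
  simp only [List.filterMap_cons, pvOut, pvOutF]
  by_cases h : (pvRecord b).items = [] <;> simp [h, pvOut']

theorem pvMain (n : Nat) : ∀ (rl : List String), rl.length ≤ n →
    ∀ (acc : List (List (String × String))),
      pvFlush (rl.foldl pvStep' (acc, PySem.Dict.empty)) =
        acc ++ (pvBlocks rl).filterMap pvOutF := by
  induction n with
  | zero =>
    intro rl hrl acc
    rw [List.length_eq_zero_iff.mp (Nat.le_zero.mp hrl)]
    simp [pvBlocks, pvFlush, PySem.Dict.empty]
  | succ n ih =>
    intro rl hrl acc
    match rl with
    | [] => simp [pvBlocks, pvFlush, PySem.Dict.empty]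
    | l :: rest =>
      by_cases hl : l = ""
      · subst hl
        have hstep : pvStep' (acc, PySem.Dict.empty) "" = (acc, PySem.Dict.empty) := by
          simp [pvStep', PySem.Dict.empty]
        have hlen : rest.length ≤ n := by simp at hrl; omega
        simp only [List.foldl_cons, hstep, pvBlocks]
        exact ih rest hlen acc
      · have hsplit : rest = rest.takeWhile (· ≠ "") ++ rest.dropWhile (· ≠ "") :=
          (List.takeWhile_append_dropWhile).symm
        have hform : l :: rest =
            (l :: rest.takeWhile (· ≠ "")) ++ rest.dropWhile (· ≠ "") := by
          rw [List.cons_append]; exact congrArg _ hsplit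
        have hrun : ∀ x ∈ l :: rest.takeWhile (· ≠ ""), x ≠ "" := by
          intro x hx
          rcases List.mem_cons.mp hx with h | h
          · simpa [h] using hl
          · simpa using List.mem_takeWhile_imp h
        have hfold :
            (l :: rest).foldl pvStep' (acc, PySem.Dict.empty) =
              (rest.dropWhile (· ≠ "")).foldl pvStep'
                (acc, pvRecord (l :: rest.takeWhile (· ≠ ""))) := by
          rw [hform, List.foldl_append, pvRunFold _ acc PySem.Dict.empty hrun]
          rfl
        have hblocks : pvBlocks (l :: rest) =
            (l :: rest.takeWhile (· ≠ "")) :: pvBlocks (rest.dropWhile (· ≠ "")) := by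
          rw [pvBlocks]; simp [hl]
        rw [hfold]
        cases hdw : rest.dropWhile (· ≠ "") with
        | nil =>
          rw [hdw] at hblocks
          rw [hblocks, pvFilterMap_cons]
          simp only [List.foldl_nil, pvBlocks, List.filterMap_nil, List.append_nil]
          rw [pvFlush_eq]
          rfl
        | cons b rest'' =>
          have hb : b = "" := by simpa using pvDropWhile_head hdw
          subst hb
          have hlen : rest''.length ≤ n := by
            have h1 : (List.dropWhile (fun x => decide (x ≠ "")) rest).length ≤ rest.length :=
              List.length_dropWhile_le _ _
            rw [hdw] at h1
            simp at h1 hrl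
            omega
          rw [hdw] at hblocks
          have hskip : pvBlocks ("" :: rest'') = pvBlocks rest'' := by rw [pvBlocks]; simp
          rw [List.foldl_cons, pvStepBlank, ih rest'' hlen, hblocks, hskip, pvFilterMap_cons]
          rw [List.append_assoc]
          rfl

theorem pvInsStep_blank (d : PySem.Dict String String) : pvInsStep d "" = d := by
  simp [pvInsStep, show PySem.Chars.isIn [':'] ([] : List Char) = false from rfl]

theorem pvRecord_cons_blank (t : List String) : pvRecord ("" :: t) = pvRecord t := by
  simp [pvRecord, pvInsStep_blank]

theorem pvRecord_append_blank (u : List String) : pvRecord (u ++ [""]) = pvRecord u := by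
  simp [pvRecord, List.foldl_append, pvInsStep_blank]

theorem pvOut_cons_blank (t : List String) : pvOut ("" :: t) = pvOut t := by
  simp [pvOut, pvRecord_cons_blank]

theorem pvBlocks_nil : pvBlocks [] = [] := by rw [pvBlocks]

theorem pvBlocks_cons_blank (t : List String) : pvBlocks ("" :: t) = pvBlocks t := by
  rw [pvBlocks]; simp

theorem pvBlocks_cons (x : String) (t : List String) (hx : x ≠ "") :
    pvBlocks (x :: t) = (x :: t.takeWhile (· ≠ "")) :: pvBlocks (t.dropWhile (· ≠ "")) := by
  rw [pvBlocks]; simp [hx]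

-- trailing structure of a list with no interior blank line
theorem pvDropChar : ∀ (t : List String) (x : String), x ≠ "" → pvSplitInt (x :: t) = none →
    t.dropWhile (· ≠ "") = [] ∨ t.dropWhile (· ≠ "") = [""] := by
  intro t
  induction t with
  | nil => intro x _ _; exact Or.inl rfl
  | cons y t' ih =>
    intro x hx hnone
    by_cases hy : y = ""
    · subst hy
      have ht' : t' = [] := by
        by_contra hne
        rw [pvSplitInt, if_pos ⟨rfl, hne⟩] at hnone
        simp at hnone
      subst ht'
      exact Or.inr (by simp)
    · rw [List.dropWhile_cons, if_pos (by simpa using hy)]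
      exact ih y hy (pvSplitInt_cons_none hnone)

theorem pvC1 : ∀ (L : List String), pvSplitInt L = none →
    (pvBlocks L).filterMap pvOutF = pvOut L := by
  intro L
  induction L with
  | nil => intro _; simp [pvBlocks_nil, pvOut, pvRecord, pvOut']; rfl
  | cons x t ih =>
    intro hnone
    by_cases hx : x = ""
    · subst hx
      rw [pvBlocks_cons_blank, ih (pvSplitInt_cons_none hnone), pvOut_cons_blank]
    · rw [pvBlocks_cons x t hx]
      rcases pvDropChar t x hx hnone with hd | hd
      · have ht : t.takeWhile (· ≠ "") = t := by
          have := List.takeWhile_append_dropWhile (p := (· ≠ "")) (l := t)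
          rw [hd, List.append_nil] at this
          exact this
        rw [hd, ht, pvFilterMap_cons, pvBlocks_nil]
        simp
      · have ht : t = t.takeWhile (· ≠ "") ++ [""] := by
          have := List.takeWhile_append_dropWhile (p := (· ≠ "")) (l := t)
          rw [hd] at this
          exact this.symm
        rw [hd, pvFilterMap_cons, pvBlocks_cons_blank, pvBlocks_nil]
        simp only [List.filterMap_nil, List.append_nil]
        have hrec : pvRecord (x :: t) = pvRecord (x :: t.takeWhile (· ≠ "")) := by
          conv_lhs => rw [ht]
          rw [show x :: (List.takeWhile (· ≠ "") t ++ [""])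
                = (x :: List.takeWhile (· ≠ "") t) ++ [""] from rfl]
          exact pvRecord_append_blank _
        rw [pvOut, pvOut, hrec]

theorem pvBlocks_append : ∀ (n : Nat) (p s : List String), p.length ≤ n →
    pvBlocks (p ++ "" :: s) = pvBlocks p ++ pvBlocks s := by
  intro n
  induction n with
  | zero =>
    intro p s hp
    rw [List.length_eq_zero_iff.mp (Nat.le_zero.mp hp)]
    rw [List.nil_append, pvBlocks_cons_blank, pvBlocks_nil, List.nil_append]
  | succ n ih =>
    intro p s hp
    match p with
    | [] => rw [List.nil_append, pvBlocks_cons_blank, pvBlocks_nil, List.nil_append]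
    | x :: p' =>
      by_cases hx : x = ""
      · subst hx
        rw [List.cons_append, pvBlocks_cons_blank, pvBlocks_cons_blank,
          ih p' s (by simp at hp; omega)]
      · rw [List.cons_append, pvBlocks_cons x _ hx, pvBlocks_cons x p' hx]
        by_cases hall : ∀ l ∈ p', decide (l ≠ "") = true
        · rw [List.takeWhile_append_of_pos hall, List.dropWhile_append_of_pos hall]
          have h1 : List.takeWhile (· ≠ "") ("" :: s) = [] := by simp
          have h2 : List.dropWhile (· ≠ "") ("" :: s) = "" :: s := by simp
          have h3 : List.takeWhile (· ≠ "") p' = p' := List.takeWhile_eq_self_iff.mpr hall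
          have h4 : List.dropWhile (· ≠ "") p' = [] := List.dropWhile_eq_nil_iff.mpr (by
            intro x hx'; exact hall x hx')
          rw [h1, h2, h3, h4, pvBlocks_cons_blank, pvBlocks_nil]
          simp
        · have hne : ¬ (List.dropWhile (· ≠ "") p').isEmpty = true := by
            rw [List.isEmpty_iff, List.dropWhile_eq_nil_iff]
            push_neg
            simp only [not_forall] at hall
            obtain ⟨l, hl, hpl⟩ := hall
            exact ⟨l, hl, by simpa using hpl⟩
          have htw : (List.takeWhile (· ≠ "") p').length ≠ p'.length := by
            intro hlen
            have heq : List.takeWhile (· ≠ "") p' = p' :=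
              (List.takeWhile_prefix _).eq_of_length hlen
            exact hall (List.takeWhile_eq_self_iff.mp heq)
          rw [List.takeWhile_append, if_neg htw, List.dropWhile_append, if_neg hne]
          cases hdw : List.dropWhile (· ≠ "") p' with
          | nil => rw [hdw] at hne; simp at hne
          | cons b w =>
            have hb : b = "" := by simpa using pvDropWhile_head hdw
            subst hb
            rw [List.cons_append, pvBlocks_cons_blank]
            have hwlen : w.length ≤ n := by
              have h5 : (List.dropWhile (fun x => decide (x ≠ "")) p').length ≤ p'.length :=
                List.length_dropWhile_le _ _
              rw [hdw] at h5
              simp at h5 hp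
              omega
            rw [ih w s hwlen, pvBlocks_cons_blank]
            simp

theorem pvGC : ∀ (n : Nat) (L : List String), L.length ≤ n →
    (pvG L).filterMap pvOutF = (pvBlocks L).filterMap pvOutF := by
  intro n
  induction n with
  | zero =>
    intro L hlen
    rw [List.length_eq_zero_iff.mp (Nat.le_zero.mp hlen)]
    have hsi : pvSplitInt ([] : List String) = none := rfl
    rw [pvG, hsi, pvBlocks_nil]
    decide
  | succ n ih =>
    intro L hlen
    cases hsi : pvSplitInt L with
    | none =>
      rw [pvG, hsi, pvFilterMap_cons]
      simp only [List.filterMap_nil, List.append_nil]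
      exact (pvC1 L hsi).symm
    | some ps =>
      obtain ⟨p, s⟩ := ps
      obtain ⟨hL, hpne, hsne, hpnone, -⟩ := pvSplitInt_spec hsi
      rw [pvG, hsi, pvFilterMap_cons]
      have hslen : s.length ≤ n := by
        have := pvSplitInt_some_lt hsi
        omega
      rw [ih s hslen]
      rw [hL, pvBlocks_append p.length p s le_rfl, List.filterMap_append, pvC1 p hpnone]

-- B's comprehension step agrees with A's isIn-guarded step
theorem pvCompStep_eq (d : PySem.Dict String String) (line : String) :
    pvCompStep d line = pvInsStep d line := by
  unfold pvCompStep pvInsStep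
  have hiff : PySem.Str.isIn ":" line = true ↔ line.toList.dropWhile (· ≠ ':') ≠ [] := by
    rw [show (PySem.Str.isIn ":" line) = PySem.Chars.isIn [':'] line.toList by simp [PySem.Str.isIn]]
    rw [PySem.Chars.isIn_iff_infix, List.singleton_infix_iff]
    rw [Ne, List.dropWhile_eq_nil_iff]
    constructor
    · intro hm hall
      have := hall ':' hm
      simp at this
    · intro hne
      by_contra hmem
      exact hne (fun x hx => by
        simp only [decide_eq_true_eq]
        intro heq
        subst heq
        exact hmem hx)
  by_cases hin : PySem.Str.isIn ":" line = true
  · have hpost := hiff.mp hin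
    rw [if_pos hin]
    unfold pvPartition
    rw [if_neg hpost]
    simp
  · have hpost : line.toList.dropWhile (· ≠ ':') = [] := by
      by_contra hne
      exact hin (hiff.mpr hne)
    rw [if_neg hin]
    unfold pvPartition
    rw [if_pos hpost]
    simp

-- every block produced by pvG is a nonempty selection of the original lines
theorem pvG_mem : ∀ (n : Nat) (L : List String), L.length ≤ n → L ≠ [] →
    ∀ M ∈ pvG L, M ≠ [] ∧ ∀ l ∈ M, l ∈ L := by
  intro n
  induction n with
  | zero => intro L hlen hne; exact absurd (List.length_eq_zero_iff.mp (Nat.le_zero.mp hlen)) hne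
  | succ n ih =>
    intro L hlen hne M hM
    cases hsi : pvSplitInt L with
    | none =>
      rw [pvG, hsi] at hM
      simp at hM
      subst hM
      exact ⟨hne, fun l hl => hl⟩
    | some ps =>
      obtain ⟨p, s⟩ := ps
      obtain ⟨hL, hpne, hsne, -, -⟩ := pvSplitInt_spec hsi
      rw [pvG, hsi] at hM
      rcases List.mem_cons.mp hM with h1 | h2
      · subst h1
        exact ⟨hpne, fun l hl => by rw [hL]; simp [hl]⟩
      · have hslen : s.length ≤ n := by
          have := pvSplitInt_some_lt hsi
          omega
        obtain ⟨hMne, hMsub⟩ := ih s hslen hsne M h2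
        exact ⟨hMne, fun l hl => by rw [hL]; simp [hMsub l hl]⟩

-- ===== VERDICT (by name: the statement is the Claim_ definition above) =====
theorem parse_apkindex_spec : Claim_equal_parse_apkindex := by
  intro content _
  unfold Spec_parse_apkindex parse_apkindex parse_apkindex_alt
  by_cases hsl : PySem.Str.splitlines content = []
  · rw [hsl]
    decide
  · have hstepfun : pvCompStep = pvInsStep :=
      funext (fun d => funext (fun l => pvCompStep_eq d l))
    have hrlsne : (PySem.Str.splitlines content).map PySem.Str.rstrip ≠ [] := by
      simpa using hsl
    have hfree := pvRls_free content
    have hA : (PySem.Str.splitlines content).foldl pvStepA ([], PySem.Dict.empty)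
        = ((PySem.Str.splitlines content).map PySem.Str.rstrip).foldl pvStep'
            ([], PySem.Dict.empty) := by
      rw [List.foldl_map]
      rfl
    have hnorm : (PySem.Str.join "\n" ((PySem.Str.splitlines content).map PySem.Str.rstrip)).toList
        = pvJoin ((PySem.Str.splitlines content).map PySem.Str.rstrip) := by
      rw [PySem.Str.toList_join]
      rfl
    show pvFlush ((PySem.Str.splitlines content).foldl pvStepA ([], PySem.Dict.empty)) =
      List.filterMap
        (fun chunk =>
          let record := ((PySem.Chars.splitOn chunk.toList ['\n']).map String.ofList).foldl
            pvCompStep PySem.Dict.empty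
          if record.items = [] then none else some record.items)
        ((PySem.Chars.splitOn
            (PySem.Str.join "\n" ((PySem.Str.splitlines content).map PySem.Str.rstrip)).toList
            ['\n', '\n']).map String.ofList)
    rw [hA, hnorm]
    rw [splitOn_eq_pvSplit _ _ (by simp),
      pvMainSplit ((PySem.Str.splitlines content).map PySem.Str.rstrip).length _ le_rfl hrlsne hfree]
    rw [List.map_map, List.filterMap_map]
    have hblocks : ∀ M ∈ pvG ((PySem.Str.splitlines content).map PySem.Str.rstrip),
        M ≠ [] ∧ ∀ l ∈ M, l ∈ (PySem.Str.splitlines content).map PySem.Str.rstrip :=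
      pvG_mem _ _ le_rfl hrlsne
    have hcong : ∀ M ∈ pvG ((PySem.Str.splitlines content).map PySem.Str.rstrip),
        ((fun chunk =>
            let record := ((PySem.Chars.splitOn chunk.toList ['\n']).map String.ofList).foldl
              pvCompStep PySem.Dict.empty
            if record.items = [] then none else some record.items) ∘
          (String.ofList ∘ pvJoin)) M = pvOutF M := by
      intro M hM
      obtain ⟨hMne, hMsub⟩ := hblocks M hM
      have hMfree : pvNLFree M := fun l hl => hfree l (hMsub l hl)
      show (let record := ((PySem.Chars.splitOn (String.ofList (pvJoin M)).toList ['\n']).map String.ofList).foldl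
              pvCompStep PySem.Dict.empty
            if record.items = [] then none else some record.items) = pvOutF M
      rw [String.toList_ofList, splitOn_eq_pvSplit _ _ (by simp), pvRoundTrip M hMne hMfree]
      rw [List.map_map]
      have hid : M.map (String.ofList ∘ String.toList) = M := by
        have hco : (String.ofList ∘ String.toList) = (id : String → String) :=
          funext (fun s => String.ofList_toList)
        rw [hco, List.map_id]
      rw [hid, hstepfun]
      rfl
    rw [List.filterMap_congr hcong]
    rw [pvGC ((PySem.Str.splitlines content).map PySem.Str.rstrip).length _ le_rfl]
    have hmain := pvMain ((PySem.Str.splitlines content).map PySem.Str.rstrip).length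
      ((PySem.Str.splitlines content).map PySem.Str.rstrip) le_rfl []
    rw [pvFlush] at hmain
    simp only [List.nil_append] at hmain
    exact hmain
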